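-- pv_equiv track=rewrite | github.com/idk-who/My_GFG_Solutions | Difficulty: Medium/Case-specific Sorting of Strings/casespecific-sorting-of-strings.py | caseSort
-- ===== SOURCE A (Python) =====
-- def caseSort(s):
--     n=len(s)
--     lower,upper=[],[]
--     for i in range(n):
--         if s[i].islower():
--             lower.append(s[i])
--         else:
--             upper.append(s[i])
--     lower.sort()
--     upper.sort()
--     ans=[]
--     l,u=0,0
--     for i in range(n):
--         if s[i].islower():
--             ans.append(lower[l])
--             l+=1
--         else:
--             ans.append(upper[u])
--             u+=1
--     return "".join(ans)
-- ===== SOURCE B (Python) =====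
-- def caseSort(s):
--     # counting sort over the 128 ASCII codes, one counter array per case group,
--     # then a single pass over s taking the next smallest remaining code per group
--     cl = [0] * 128
--     cu = [0] * 128
--     for ch in s:
--         if ch.islower():
--             cl[ord(ch)] += 1
--         else:
--             cu[ord(ch)] += 1
--     out = []
--     l = 0
--     u = 0
--     for ch in s:
--         if ch.islower():
--             while cl[l] == 0:
--                 l += 1
--             out.append(chr(l))
--             cl[l] -= 1
--         else:
--             while cu[u] == 0:
--                 u += 1
--             out.append(chr(u))
--             cu[u] -= 1
--     return "".join(out)
-- ===== Notes on version B (the rewrite author's own statement) =====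
-- stated objective: faster
-- what changed: Replaces the two comparison sorts (lower.sort()/upper.sort()) by counting sorts: one 128-slot counter per case group is filled in one pass, and the output is rebuilt in a second pass by advancing a pointer to the next non-empty counter slot of the matching group.
import Mathlib
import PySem

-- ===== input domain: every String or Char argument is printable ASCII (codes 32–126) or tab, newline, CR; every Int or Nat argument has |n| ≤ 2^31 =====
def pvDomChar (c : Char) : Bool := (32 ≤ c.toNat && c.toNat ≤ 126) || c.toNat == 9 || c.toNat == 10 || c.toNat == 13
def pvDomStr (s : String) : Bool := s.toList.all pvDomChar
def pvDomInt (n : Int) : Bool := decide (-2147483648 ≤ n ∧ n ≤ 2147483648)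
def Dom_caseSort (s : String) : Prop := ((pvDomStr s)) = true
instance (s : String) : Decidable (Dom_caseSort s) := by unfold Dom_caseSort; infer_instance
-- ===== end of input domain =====

-- B replaces A's two comparison sorts by counting sorts over the 128 ASCII codes
-- (one counter array per case group, output rebuilt by pointer scans): faster, O(n) vs O(n log n).

-- ===== PORT A =====
-- the two append-loops building lower/upper
def aSplit (cs : List Char) : List Char × List Char :=
  cs.foldl (fun p c =>
    if PySem.Chars.islower c then (p.1 ++ [c], p.2) else (p.1, p.2 ++ [c])) ([], [])

-- A's second loop: indexes lower[l]/upper[u] with pointers that advance one by one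
-- from the front, rendered as popping the head of the remaining list (same values).
-- The [] branches are unreachable (Python never raises here: the counts match by construction).
def aMerge : List Char → List Char → List Char → List Char
  | [], _, _ => []
  | c :: cs, lo, up =>
    if PySem.Chars.islower c then
      match lo with
      | x :: ls => x :: aMerge cs ls up
      | [] => []
    else
      match up with
      | x :: us => x :: aMerge cs lo us
      | [] => []

def caseSort (s : String) : String :=
  let cs := s.toList
  let p := aSplit cs
  let lower := PySem.List.sorted p.1 (fun x => x) false
  let upper := PySem.List.sorted p.2 (fun x => x) false
  String.mk (aMerge cs lower upper)

-- ===== PORT B =====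
-- Source B's first loop: fill the two 128-slot counter lists (ord(ch) < 128 on the ASCII domain,
-- so list indexing/assignment is exactly getD/set there)
def bCount (cs : List Char) : List Int × List Int :=
  cs.foldl (fun p c =>
    if PySem.Chars.islower c then
      (p.1.set c.toNat (p.1.getD c.toNat 0 + 1), p.2)
    else
      (p.1, p.2.set c.toNat (p.2.getD c.toNat 0 + 1)))
    (List.replicate 128 0, List.replicate 128 0)

-- Source B's 'while cnt[l] == 0: l += 1'; fuel 128 bounds the scan (a non-empty slot is
-- always found within the 128 entries whenever Python's loop terminates)
def bNext (cnt : List Int) (l : Nat) : Nat → Nat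
  | 0 => l
  | f + 1 => if cnt.getD l 0 = 0 then bNext cnt (l + 1) f else l

-- Source B's second loop over s with the two count arrays and pointers l, u
def bMerge : List Char → List Int → List Int → Nat → Nat → List Char
  | [], _, _, _, _ => []
  | c :: cs, cl, cu, l, u =>
    if PySem.Chars.islower c then
      let l' := bNext cl l 128
      Char.ofNat l' :: bMerge cs (cl.set l' (cl.getD l' 0 - 1)) cu l' u
    else
      let u' := bNext cu u 128
      Char.ofNat u' :: bMerge cs cl (cu.set u' (cu.getD u' 0 - 1)) l u'

def caseSort_alt (s : String) : String :=
  let cs := s.toList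
  let p := bCount cs
  String.mk (bMerge cs p.1 p.2 0 0)

-- ===== PRECONDITION & SPEC =====
def Spec_caseSort (s : String) (out : String) : Prop := out = caseSort_alt s
instance (s : String) (out : String) : Decidable (Spec_caseSort s out) := by unfold Spec_caseSort; infer_instance

-- ===== CLAIM (what is proved, stated in full; the proofs are below) =====
def Claim_equal_caseSort : Prop := ∀ (s : String), Dom_caseSort s → Spec_caseSort s (caseSort s)

-- ===== LEMMAS AND PROOFS =====

-- abstract counter built from a char list (what bCount computes per group)
def countsOf (xs : List Char) : List Int :=
  xs.foldl (fun a c => a.set c.toNat (a.getD c.toNat 0 + 1)) (List.replicate 128 0)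

-- the sorted char list a counter array denotes, from slot l on, fuel f
def expandF (cnt : List Int) : Nat → Nat → List Char
  | _, 0 => []
  | l, f + 1 => List.replicate (cnt.getD l 0).toNat (Char.ofNat l) ++ expandF cnt (l + 1) f

-- ---- char facts ----
lemma charOfNat_toNat (n : Nat) (h : n < 55296) : (Char.ofNat n).toNat = n := by
  have hv : Nat.isValidChar n := Or.inl h
  simp [Char.ofNat, hv, Char.ofNatAux, Char.toNat]

lemma charOfNat_le (j k : Nat) (hj : j ≤ k) (hk : k < 55296) : Char.ofNat j ≤ Char.ofNat k := by
  rw [Char.le_def, UInt32.le_iff_toNat_le]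
  show (Char.ofNat j).toNat ≤ (Char.ofNat k).toNat
  rw [charOfNat_toNat j (by omega), charOfNat_toNat k hk]
  exact hj

lemma char_eq_ofNat_iff (c : Char) (k : Nat) (hk : k < 55296) :
    Char.ofNat k = c ↔ c.toNat = k := by
  constructor
  · intro h; rw [← h]; exact charOfNat_toNat k hk
  · intro h; rw [← h]; exact Char.ofNat_toNat c

lemma char_toNat_inj (c d : Char) (h : c.toNat = d.toNat) : c = d := by
  apply Char.ext
  exact UInt32.toNat_inj.mp h

-- ---- getD / set facts ----
lemma getD_set_formula (cnt : List Int) (i k : Nat) (v : Int) :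
    (cnt.set i v).getD k 0 = if i = k ∧ i < cnt.length then v else cnt.getD k 0 := by
  simp only [List.getD_eq_getElem?_getD, List.getElem?_set]
  by_cases h1 : i = k
  · subst h1
    by_cases h2 : i < cnt.length
    · simp [h2]
    · simp [h2]
  · simp [h1]

lemma lt_length_of_getD_ne (cnt : List Int) (k : Nat) (h : cnt.getD k 0 ≠ 0) : k < cnt.length := by
  by_contra hk
  apply h
  simp [List.getD_eq_getElem?_getD, List.getElem?_eq_none (by omega : cnt.length ≤ k)]

lemma getD_replicate_zero (k : Nat) : (List.replicate 128 (0 : Int)).getD k 0 = 0 := by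
  simp only [List.getD_eq_getElem?_getD, List.getElem?_replicate]
  split_ifs <;> rfl

-- ---- counter characterisation ----
lemma getD_foldl_cstep (xs : List Char) : ∀ acc : List Int, ∀ k : Nat,
    (∀ c ∈ xs, c.toNat < acc.length) →
    (xs.foldl (fun a c => a.set c.toNat (a.getD c.toNat 0 + 1)) acc).getD k 0
      = acc.getD k 0 + (xs.countP (fun c => c.toNat == k) : Int) := by
  induction xs with
  | nil => intro acc k _; simp
  | cons c cs ih =>
    intro acc k hlt
    simp only [List.foldl_cons]
    rw [ih _ k (by intro d hd; rw [List.length_set]; exact hlt d (by simp [hd]))]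
    rw [getD_set_formula]
    have hc : c.toNat < acc.length := hlt c (by simp)
    by_cases hk : c.toNat = k
    · subst hk
      rw [if_pos ⟨rfl, hc⟩, List.countP_cons, if_pos (by simp)]
      push_cast
      ring
    · rw [if_neg (by tauto), List.countP_cons, if_neg (by simp [hk])]
      push_cast
      ring

lemma getD_countsOf (xs : List Char) (k : Nat) (h : ∀ c ∈ xs, c.toNat < 128) :
    (countsOf xs).getD k 0 = (xs.countP (fun c => c.toNat == k) : Int) := by
  unfold countsOf
  rw [getD_foldl_cstep xs _ k (by simpa using h), getD_replicate_zero]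
  ring

lemma nonneg_countsOf (xs : List Char) (h : ∀ c ∈ xs, c.toNat < 128) :
    ∀ k : Nat, 0 ≤ (countsOf xs).getD k 0 := by
  intro k
  rw [getD_countsOf xs k h]
  positivity

-- ---- expandF facts ----
lemma count_expandF (cnt : List Int) (a : Char) : ∀ f l, l + f ≤ 55296 →
    List.count a (expandF cnt l f)
      = if l ≤ a.toNat ∧ a.toNat < l + f then (cnt.getD a.toNat 0).toNat else 0 := by
  intro f
  induction f with
  | zero =>
    intro l _
    rw [if_neg (by omega)]
    rfl
  | succ f ih =>
    intro l hl
    show List.count a (List.replicate (cnt.getD l 0).toNat (Char.ofNat l) ++ expandF cnt (l + 1) f) = _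
    rw [List.count_append, List.count_replicate, ih (l + 1) (by omega)]
    by_cases hk : a.toNat = l
    · have : (Char.ofNat l == a) = true := by
        rw [beq_iff_eq, char_eq_ofNat_iff a l (by omega)]; exact hk
      rw [if_pos this, if_neg (by omega), if_pos (by omega), hk]
      omega
    · have : ¬ (Char.ofNat l == a) = true := by
        rw [beq_iff_eq, char_eq_ofNat_iff a l (by omega)]; exact fun h => hk h
      rw [if_neg this]
      by_cases hr : l + 1 ≤ a.toNat ∧ a.toNat < l + 1 + f
      · rw [if_pos hr, if_pos (by omega)]
        omega
      · rw [if_neg hr, if_neg (by omega)]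
  
lemma mem_expandF (cnt : List Int) : ∀ f l x, x ∈ expandF cnt l f →
    ∃ j, l ≤ j ∧ j < l + f ∧ x = Char.ofNat j := by
  intro f
  induction f with
  | zero => intro l x hx; simp [expandF] at hx
  | succ f ih =>
    intro l x hx
    rw [show expandF cnt l (f + 1)
        = List.replicate (cnt.getD l 0).toNat (Char.ofNat l) ++ expandF cnt (l + 1) f from rfl,
      List.mem_append] at hx
    rcases hx with hx | hx
    · exact ⟨l, le_refl l, by omega, List.eq_of_mem_replicate hx⟩
    · obtain ⟨j, h1, h2, h3⟩ := ih (l + 1) x hx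
      exact ⟨j, by omega, by omega, h3⟩

lemma pairwise_expandF (cnt : List Int) : ∀ f l, l + f ≤ 55296 →
    (expandF cnt l f).Pairwise (· ≤ ·) := by
  intro f
  induction f with
  | zero => intro l _; exact List.Pairwise.nil
  | succ f ih =>
    intro l hl
    rw [show expandF cnt l (f + 1)
        = List.replicate (cnt.getD l 0).toNat (Char.ofNat l) ++ expandF cnt (l + 1) f from rfl,
      List.pairwise_append]
    refine ⟨List.pairwise_replicate.mpr (Or.inr le_rfl), ih (l + 1) (by omega), ?_⟩
    intro x hx y hy
    rw [List.eq_of_mem_replicate hx]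
    obtain ⟨j, h1, _, h3⟩ := mem_expandF cnt f (l + 1) y hy
    rw [h3]
    exact charOfNat_le l j (by omega) (by omega)

lemma expandF_congr (c1 c2 : List Int) : ∀ f l,
    (∀ j, l ≤ j → j < l + f → c1.getD j 0 = c2.getD j 0) → expandF c1 l f = expandF c2 l f := by
  intro f
  induction f with
  | zero => intro l _; rfl
  | succ f ih =>
    intro l h
    show List.replicate (c1.getD l 0).toNat (Char.ofNat l) ++ expandF c1 (l + 1) f
       = List.replicate (c2.getD l 0).toNat (Char.ofNat l) ++ expandF c2 (l + 1) f
    rw [h l le_rfl (by omega), ih (l + 1) (fun j h1 h2 => h j (by omega) (by omega))]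

-- ---- the pointer-scan step matches popping the head of the expansion ----
lemma expand_step (cnt : List Int) :
    ∀ f l G c ls, f ≤ G → (∀ j, 0 ≤ cnt.getD j 0) →
    expandF cnt l f = c :: ls →
    c = Char.ofNat (bNext cnt l G) ∧
    0 < cnt.getD (bNext cnt l G) 0 ∧
    l ≤ bNext cnt l G ∧ bNext cnt l G < l + f ∧
    ls = expandF (cnt.set (bNext cnt l G) (cnt.getD (bNext cnt l G) 0 - 1))
           (bNext cnt l G) (l + f - bNext cnt l G) := by
  intro f
  induction f with
  | zero => intro l G c ls _ _ h; exact absurd h (by simp [expandF])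
  | succ f ih =>
    intro l G c ls hG hnn h
    obtain ⟨G', rfl⟩ : ∃ G', G = G' + 1 := ⟨G - 1, by omega⟩
    by_cases h0 : cnt.getD l 0 = 0
    · have hb : bNext cnt l (G' + 1) = bNext cnt (l + 1) G' := by
        show (if cnt.getD l 0 = 0 then bNext cnt (l + 1) G' else l) = bNext cnt (l + 1) G'
        rw [if_pos h0]
      have hx : expandF cnt (l + 1) f = c :: ls := by
        have := h
        rw [show expandF cnt l (f + 1)
            = List.replicate (cnt.getD l 0).toNat (Char.ofNat l) ++ expandF cnt (l + 1) f from rfl,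
          h0] at this
        simpa using this
      obtain ⟨e1, e2, e3, e4, e5⟩ := ih (l + 1) G' c ls (by omega) hnn hx
      rw [hb]
      refine ⟨e1, e2, by omega, by omega, ?_⟩
      rw [e5]
      congr 1
      omega
    · have hb : bNext cnt l (G' + 1) = l := by
        show (if cnt.getD l 0 = 0 then bNext cnt (l + 1) G' else l) = l
        rw [if_neg h0]
      rw [hb]
      have hpos : 0 < cnt.getD l 0 := lt_of_le_of_ne (hnn l) (Ne.symm h0)
      have ht : (cnt.getD l 0).toNat = ((cnt.getD l 0).toNat - 1) + 1 := by omega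
      rw [show expandF cnt l (f + 1)
          = List.replicate (cnt.getD l 0).toNat (Char.ofNat l) ++ expandF cnt (l + 1) f from rfl,
        ht, List.replicate_succ, List.cons_append, List.cons.injEq] at h
      obtain ⟨hc, hls⟩ := h
      refine ⟨hc.symm, hpos, le_rfl, by omega, ?_⟩
      have hll : l < cnt.length := lt_length_of_getD_ne cnt l h0
      rw [show l + (f + 1) - l = f + 1 from by omega]
      show ls = List.replicate ((cnt.set l (cnt.getD l 0 - 1)).getD l 0).toNat (Char.ofNat l)
          ++ expandF (cnt.set l (cnt.getD l 0 - 1)) (l + 1) f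
      rw [getD_set_formula, if_pos ⟨rfl, hll⟩]
      rw [expandF_congr (cnt.set l (cnt.getD l 0 - 1)) cnt f (l + 1)
        (by
          intro j h1 h2
          rw [getD_set_formula, if_neg (by omega)])]
      rw [show (cnt.getD l 0 - 1).toNat = (cnt.getD l 0).toNat - 1 from by omega, ← hls]

-- ---- cons-shape equations for the two merge loops ----
lemma aMerge_pos (c : Char) (cs : List Char) (x : Char) (ls up : List Char)
    (hc : PySem.Chars.islower c = true) :
    aMerge (c :: cs) (x :: ls) up = x :: aMerge cs ls up := by
  simp [aMerge, hc]

lemma aMerge_neg (c : Char) (cs lo : List Char) (x : Char) (us : List Char)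
    (hc : PySem.Chars.islower c = false) :
    aMerge (c :: cs) lo (x :: us) = x :: aMerge cs lo us := by
  simp [aMerge, hc]

lemma bMerge_pos (c : Char) (cs : List Char) (cl cu : List Int) (l u : Nat)
    (hc : PySem.Chars.islower c = true) :
    bMerge (c :: cs) cl cu l u
      = Char.ofNat (bNext cl l 128)
        :: bMerge cs (cl.set (bNext cl l 128) (cl.getD (bNext cl l 128) 0 - 1)) cu (bNext cl l 128) u := by
  simp [bMerge, hc]

lemma bMerge_neg (c : Char) (cs : List Char) (cl cu : List Int) (l u : Nat)
    (hc : PySem.Chars.islower c = false) :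
    bMerge (c :: cs) cl cu l u
      = Char.ofNat (bNext cu u 128)
        :: bMerge cs cl (cu.set (bNext cu u 128) (cu.getD (bNext cu u 128) 0 - 1)) l (bNext cu u 128) := by
  simp [bMerge, hc]

-- ---- the two merge loops agree ----
lemma merge_eq (cs : List Char) : ∀ (lo up : List Char) (cl cu : List Int) (l u : Nat),
    (∀ j, 0 ≤ cl.getD j 0) → (∀ j, 0 ≤ cu.getD j 0) →
    l ≤ 128 → u ≤ 128 →
    lo = expandF cl l (128 - l) → up = expandF cu u (128 - u) →
    cs.countP PySem.Chars.islower = lo.length →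
    cs.countP (fun c => !PySem.Chars.islower c) = up.length →
    aMerge cs lo up = bMerge cs cl cu l u := by
  induction cs with
  | nil => intro lo up cl cu l u _ _ _ _ _ _ _ _; rfl
  | cons c cs ih =>
    intro lo up cl cu l u hnl hnu hl hu hlo hup hcl hcu
    by_cases hc : PySem.Chars.islower c
    · have hlen : 0 < lo.length := by
        rw [← hcl, List.countP_cons, if_pos hc]; omega
      obtain ⟨c0, ls, rfl⟩ : ∃ c0 ls, lo = c0 :: ls := by
        cases lo with
        | nil => simp at hlen
        | cons a b => exact ⟨a, b, rfl⟩
      obtain ⟨e1, e2, e3, e4, e5⟩ :=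
        expand_step cl (128 - l) l 128 c0 ls (by omega) hnl hlo.symm
      have hfix : l + (128 - l) - bNext cl l 128 = 128 - bNext cl l 128 := by omega
      rw [hfix] at e5
      rw [aMerge_pos c cs c0 ls up hc, bMerge_pos c cs cl cu l u hc, ← e1]
      congr 1
      apply ih ls up _ cu (bNext cl l 128) u
      · intro j
        rw [getD_set_formula]
        split_ifs with hj
        · omega
        · exact hnl j
      · exact hnu
      · omega
      · exact hu
      · exact e5
      · exact hup
      · have h1 := hcl
        rw [List.countP_cons, if_pos hc, List.length_cons] at h1
        omega
      · have h1 := hcu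
        rw [List.countP_cons] at h1
        simp only [hc, Bool.not_true] at h1
        simpa using h1
    · have hc' : PySem.Chars.islower c = false := by simpa using hc
      have hlen : 0 < up.length := by
        rw [← hcu, List.countP_cons]
        simp only [hc', Bool.not_false, if_pos]
        omega
      obtain ⟨c0, us, rfl⟩ : ∃ c0 us, up = c0 :: us := by
        cases up with
        | nil => simp at hlen
        | cons a b => exact ⟨a, b, rfl⟩
      obtain ⟨e1, e2, e3, e4, e5⟩ :=
        expand_step cu (128 - u) u 128 c0 us (by omega) hnu hup.symm
      have hfix : u + (128 - u) - bNext cu u 128 = 128 - bNext cu u 128 := by omega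
      rw [hfix] at e5
      rw [aMerge_neg c cs lo c0 us hc', bMerge_neg c cs cl cu l u hc', ← e1]
      congr 1
      apply ih lo us cl _ l (bNext cu u 128)
      · exact hnl
      · intro j
        rw [getD_set_formula]
        split_ifs with hj
        · omega
        · exact hnu j
      · exact hl
      · omega
      · exact hlo
      · exact e5
      · have h1 := hcl
        rw [List.countP_cons, if_neg (by simp [hc'])] at h1
        exact h1
      · have h1 := hcu
        rw [List.countP_cons] at h1
        simp only [hc', Bool.not_false, if_pos, List.length_cons] at h1
        omega

-- ---- the counting sort computes Python's sorted() ----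
lemma count_eq_countP_toNat (xs : List Char) (a : Char) :
    List.count a xs = xs.countP (fun c => c.toNat == a.toNat) := by
  rw [List.count_eq_countP]
  apply List.countP_congr
  intro c _
  constructor
  · intro h
    rw [beq_iff_eq] at *
    rw [h]
  · intro h
    rw [beq_iff_eq] at *
    exact char_toNat_inj c a h

lemma sorted_eq_expand (xs : List Char) (h : ∀ c ∈ xs, c.toNat < 128) :
    PySem.List.sorted xs (fun x => x) false = expandF (countsOf xs) 0 128 := by
  apply PySem.List.sorted_id_eq_of_perm_of_pairwise
  · rw [List.perm_iff_count]
    intro a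
    rw [count_expandF (countsOf xs) a 128 0 (by omega)]
    by_cases ha : a.toNat < 128
    · rw [if_pos ⟨by omega, by omega⟩, getD_countsOf xs a.toNat h,
        count_eq_countP_toNat xs a]
      simp
    · rw [if_neg (by omega)]
      symm
      rw [List.count_eq_zero]
      intro hmem
      exact ha (h a hmem)
  · exact pairwise_expandF (countsOf xs) 128 0 (by omega)

-- ---- the split / count loops ----
lemma aSplit_eq_aux (cs : List Char) : ∀ a b : List Char,
    cs.foldl (fun p c =>
      if PySem.Chars.islower c then (p.1 ++ [c], p.2) else (p.1, p.2 ++ [c])) (a, b)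
    = (a ++ cs.filter PySem.Chars.islower, b ++ cs.filter (fun c => !PySem.Chars.islower c)) := by
  induction cs with
  | nil => intro a b; simp
  | cons c cs ih =>
    intro a b
    by_cases hc : PySem.Chars.islower c
    · simp [List.foldl_cons, hc, ih]
    · simp [List.foldl_cons, hc, ih]

lemma aSplit_eq (cs : List Char) :
    aSplit cs = (cs.filter PySem.Chars.islower, cs.filter (fun c => !PySem.Chars.islower c)) := by
  unfold aSplit
  rw [aSplit_eq_aux]
  simp

lemma bCount_eq_aux (cs : List Char) : ∀ a b : List Int,
    cs.foldl (fun p c =>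
      if PySem.Chars.islower c then
        (p.1.set c.toNat (p.1.getD c.toNat 0 + 1), p.2)
      else
        (p.1, p.2.set c.toNat (p.2.getD c.toNat 0 + 1))) (a, b)
    = ((cs.filter PySem.Chars.islower).foldl (fun a c => a.set c.toNat (a.getD c.toNat 0 + 1)) a,
       (cs.filter (fun c => !PySem.Chars.islower c)).foldl (fun a c => a.set c.toNat (a.getD c.toNat 0 + 1)) b) := by
  induction cs with
  | nil => intro a b; simp
  | cons c cs ih =>
    intro a b
    rw [List.foldl_cons]
    by_cases hc : PySem.Chars.islower c
    · show List.foldl _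
        (if PySem.Chars.islower c then (a.set c.toNat (a.getD c.toNat 0 + 1), b)
         else (a, b.set c.toNat (b.getD c.toNat 0 + 1))) cs = _
      rw [if_pos hc, ih, List.filter_cons_of_pos hc,
        List.filter_cons_of_neg (by simp [hc]), List.foldl_cons]
    · show List.foldl _
        (if PySem.Chars.islower c then (a.set c.toNat (a.getD c.toNat 0 + 1), b)
         else (a, b.set c.toNat (b.getD c.toNat 0 + 1))) cs = _
      rw [if_neg hc, ih, List.filter_cons_of_neg hc,
        List.filter_cons_of_pos (by simp [hc]), List.foldl_cons]

lemma bCount_eq (cs : List Char) :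
    bCount cs = (countsOf (cs.filter PySem.Chars.islower),
                 countsOf (cs.filter (fun c => !PySem.Chars.islower c))) := by
  unfold bCount countsOf
  rw [bCount_eq_aux]

-- ---- main ----
lemma dom_chars (s : String) (h : Dom_caseSort s) : ∀ c ∈ s.toList, c.toNat < 128 := by
  intro c hc
  unfold Dom_caseSort pvDomStr at h
  rw [List.all_eq_true] at h
  have := h c hc
  unfold pvDomChar at this
  simp only [Bool.or_eq_true, Bool.and_eq_true, decide_eq_true_eq, beq_iff_eq] at this
  omega

-- ===== VERDICT (by name: the statement is the Claim_ definition above) =====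
theorem caseSort_spec : Claim_equal_caseSort := by
  intro s hDom
  unfold Spec_caseSort
  show String.mk (aMerge s.toList
      (PySem.List.sorted (aSplit s.toList).1 (fun x => x) false)
      (PySem.List.sorted (aSplit s.toList).2 (fun x => x) false))
    = String.mk (bMerge s.toList (bCount s.toList).1 (bCount s.toList).2 0 0)
  have hchars : ∀ c ∈ s.toList, c.toNat < 128 := dom_chars s hDom
  have hlow : ∀ c ∈ s.toList.filter PySem.Chars.islower, c.toNat < 128 :=
    fun c hc => hchars c (List.mem_of_mem_filter hc)
  have hupp : ∀ c ∈ s.toList.filter (fun c => !PySem.Chars.islower c), c.toNat < 128 :=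
    fun c hc => hchars c (List.mem_of_mem_filter hc)
  rw [aSplit_eq, bCount_eq]
  congr 1
  apply merge_eq
  · exact nonneg_countsOf _ hlow
  · exact nonneg_countsOf _ hupp
  · omega
  · omega
  · rw [sorted_eq_expand _ hlow]
  · rw [sorted_eq_expand _ hupp]
  · rw [PySem.List.length_sorted, List.countP_eq_length_filter]
  · rw [PySem.List.length_sorted, List.countP_eq_length_filter]
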